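-- pv_equiv track=rewrite | github.com/LordAizen1/cipherlens | backend/scripts/generate_dataset_v4.py | _xtea_encrypt_block
-- ===== SOURCE A (Python) =====
-- def _xtea_encrypt_block(v0: int, v1: int, key) -> tuple:
--     delta = 0x9E3779B9
--     s = 0
--     for _ in range(32):
--         v0 = (v0 + (((v1 << 4 ^ v1 >> 5) + v1) ^ (s + key[s & 3]))) & 0xFFFFFFFF
--         s = (s + delta) & 0xFFFFFFFF
--         v1 = (v1 + (((v0 << 4 ^ v0 >> 5) + v0) ^ (s + key[(s >> 11) & 3]))) & 0xFFFFFFFF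
--     return v0, v1
-- ===== SOURCE B (Python) =====
-- def _xtea_encrypt_block(v0: int, v1: int, key) -> tuple:
--     mask = 0xFFFFFFFF
--     delta = 0x9E3779B9
--     # Phase 1: build the round-subkey schedule (32 pairs), independent of v0/v1.
--     schedule = []
--     s = 0
--     for _ in range(32):
--         sub0 = s + key[s & 3]
--         s = (s + delta) & mask
--         sub1 = s + key[(s >> 11) & 3]
--         schedule.append((sub0, sub1))
--     # Phase 2: the Feistel mixing, driven only by the schedule.
--     for sub0, sub1 in schedule:
--         v0 = (v0 + (((v1 << 4 ^ v1 >> 5) + v1) ^ sub0)) & mask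
--         v1 = (v1 + (((v0 << 4 ^ v0 >> 5) + v0) ^ sub1)) & mask
--     return v0, v1
-- ===== Notes on version B (the rewrite author's own statement) =====
-- stated objective: alternative
-- what changed: B splits the cipher into two phases: it first materialises the 32-round subkey schedule (the sum-counter walk and key indexing) as a list of (sub0, sub1) pairs, then a separate loop performs only the Feistel mixing over that list; A interleaves both in one loop over a three-part state.
import Mathlib
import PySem

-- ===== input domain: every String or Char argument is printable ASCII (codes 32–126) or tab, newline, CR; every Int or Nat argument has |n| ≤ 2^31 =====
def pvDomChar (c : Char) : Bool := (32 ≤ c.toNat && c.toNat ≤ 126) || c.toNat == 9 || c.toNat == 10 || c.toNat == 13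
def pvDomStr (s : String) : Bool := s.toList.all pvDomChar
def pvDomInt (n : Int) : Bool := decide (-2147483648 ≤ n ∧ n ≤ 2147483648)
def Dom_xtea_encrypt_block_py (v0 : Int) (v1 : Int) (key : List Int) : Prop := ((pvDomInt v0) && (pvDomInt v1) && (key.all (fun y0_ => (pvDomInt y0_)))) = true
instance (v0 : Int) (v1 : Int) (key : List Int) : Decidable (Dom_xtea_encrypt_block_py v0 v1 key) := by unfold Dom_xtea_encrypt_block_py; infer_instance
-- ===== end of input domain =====

-- B separates the XTEA round into two phases — build the 32-entry subkey schedule first, then run the Feistel mixing over it — instead of A's single interleaved loop (objective: alternative decomposition, same cost).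


-- ===== PORT A =====
-- one round of A's loop over the state (v0, v1, s); key[i] with i = s&3 ∈ {0..3} is
-- in range on Pre_ (4 ≤ key.length), so `pyGetD … 0` equals Python's key[i] there
def xteaRoundA (key : List Int) (st : Int × Int × Int) : Int × Int × Int :=
  let v0 := PySem.Int.band (st.1 + PySem.Int.bxor (PySem.Int.bxor (st.2.1 <<< 4) (st.2.1 >>> 5) + st.2.1) (st.2.2 + PySem.List.pyGetD key (PySem.Int.band st.2.2 3) 0)) 0xFFFFFFFF
  let s := PySem.Int.band (st.2.2 + 0x9E3779B9) 0xFFFFFFFF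
  let v1 := PySem.Int.band (st.2.1 + PySem.Int.bxor (PySem.Int.bxor (v0 <<< 4) (v0 >>> 5) + v0) (s + PySem.List.pyGetD key (PySem.Int.band (s >>> 11) 3) 0)) 0xFFFFFFFF
  (v0, v1, s)

def xtea_encrypt_block_py (v0 : Int) (v1 : Int) (key : List Int) : Int × Int :=
  let st := (List.range 32).foldl (fun st _ => xteaRoundA key st) (v0, v1, 0)
  (st.1, st.2.1)

-- ===== PORT B =====
-- Phase 1: the subkey schedule, a list of n (sub0, sub1) pairs starting from counter s
def xteaSched (key : List Int) : Int → Nat → List (Int × Int)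
  | _, 0 => []
  | s, n+1 =>
    let sub0 := s + PySem.List.pyGetD key (PySem.Int.band s 3) 0
    let s' := PySem.Int.band (s + 0x9E3779B9) 0xFFFFFFFF
    let sub1 := s' + PySem.List.pyGetD key (PySem.Int.band (s' >>> 11) 3) 0
    (sub0, sub1) :: xteaSched key s' n

-- Phase 2: one Feistel mixing step driven by a schedule pair
def xteaMix (st : Int × Int) (p : Int × Int) : Int × Int :=
  let v0 := PySem.Int.band (st.1 + PySem.Int.bxor (PySem.Int.bxor (st.2 <<< 4) (st.2 >>> 5) + st.2) p.1) 0xFFFFFFFF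
  let v1 := PySem.Int.band (st.2 + PySem.Int.bxor (PySem.Int.bxor (v0 <<< 4) (v0 >>> 5) + v0) p.2) 0xFFFFFFFF
  (v0, v1)

def xtea_encrypt_block_py_alt (v0 : Int) (v1 : Int) (key : List Int) : Int × Int :=
  (xteaSched key 0 32).foldl xteaMix (v0, v1)

-- ===== PRECONDITION & SPEC =====
-- Python A raises IndexError iff len(key) < 4 (all four indices 0..3 occur in the schedule)
def Pre_xtea_encrypt_block_py (v0 : Int) (v1 : Int) (key : List Int) : Prop := 4 ≤ key.length
instance (v0 : Int) (v1 : Int) (key : List Int) : Decidable (Pre_xtea_encrypt_block_py v0 v1 key) := by unfold Pre_xtea_encrypt_block_py; infer_instance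
def pvWitness_xtea_encrypt_block_py : Int × Int × List Int := (1, 2, [3, 4, 5, 6])

def Spec_xtea_encrypt_block_py (v0 : Int) (v1 : Int) (key : List Int) (out : Int × Int) : Prop := out = xtea_encrypt_block_py_alt v0 v1 key
instance (v0 : Int) (v1 : Int) (key : List Int) (out : Int × Int) : Decidable (Spec_xtea_encrypt_block_py v0 v1 key out) := by unfold Spec_xtea_encrypt_block_py; infer_instance

-- ===== CLAIM (what is proved, stated in full; the proofs are below) =====
def Claim_equal_xtea_encrypt_block_py : Prop := ∀ (v0 : Int) (v1 : Int) (key : List Int), Dom_xtea_encrypt_block_py v0 v1 key → Pre_xtea_encrypt_block_py v0 v1 key → Spec_xtea_encrypt_block_py v0 v1 key (xtea_encrypt_block_py v0 v1 key)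

-- ===== LEMMAS AND PROOFS =====
theorem foldl_range_iterate {α : Type} (f : α → α) (x : α) (n : Nat) :
    (List.range n).foldl (fun a _ => f a) x = f^[n] x := by
  induction n with
  | zero => rfl
  | succ n ih => rw [List.range_succ, List.foldl_append, ih, Function.iterate_succ_apply']; rfl

theorem sched_mix_eq_roundA (key : List Int) (n : Nat) :
    ∀ (s v0 v1 : Int),
      (xteaSched key s n).foldl xteaMix (v0, v1) =
        (((xteaRoundA key)^[n] (v0, v1, s)).1, ((xteaRoundA key)^[n] (v0, v1, s)).2.1) := by
  induction n with
  | zero => intro s v0 v1; rfl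
  | succ n ih =>
      intro s v0 v1
      rw [Function.iterate_succ_apply]
      show List.foldl xteaMix (xteaMix (v0, v1) _) (xteaSched key _ n) = _
      rw [ih]
      rfl

-- ===== VERDICT (by name: the statement is the Claim_ definition above) =====
theorem xtea_encrypt_block_py_spec : Claim_equal_xtea_encrypt_block_py := by
  intro v0 v1 key _ _
  show xtea_encrypt_block_py v0 v1 key = xtea_encrypt_block_py_alt v0 v1 key
  unfold xtea_encrypt_block_py xtea_encrypt_block_py_alt
  rw [foldl_range_iterate, sched_mix_eq_roundA]
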